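-- pv_equiv track=rewrite | github.com/vnetserg/semantics | prepare.py | texts_comparison
-- ===== SOURCE A (Python) =====
-- def levenstein_distance(a, b):
--     '''
--         Вернуть расстояние Левенштейна между строками a и b.
--         Аргументы:
--             a, b - строки;
--         Возвращает: целое число - расстояние Левенштейна.
--     '''
--     n, m = len(a), len(b)
--     if n > m:
--         a, b = b, a
--         n, m = m, n
--     current_row = range(n+1)
--     for i in range(1, m+1):
--         previous_row, current_row = current_row, [i]+[0]*n
--         for j in range(1,n+1):
--             add, delete, change = previous_row[j]+1, current_row[j-1]+1, previous_row[j-1]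
--             if a[j-1] != b[i-1]:
--                 change += 1
--             current_row[j] = min(add, delete, change)
--     return current_row[n]
--
-- def texts_comparison(t1, t2):
--     '''
--         Осуществить сравнение двух текстов и составить одну
--         строку признаков.
--         Аргументы:
--             t1, t2 - словари, у которых ключ 'tokens' - это набор
--                 кортежей (нормальная форма слова, граммема слова)
--         Возвращает: словарь с результатом сравнения данных текстов
--     '''
--     result = {}
--
--     # Ищем явные повторы:
--     common = t1["tokens"] & t2["tokens"]
--     for norm, grammema in common:
--         result[grammema] = result.get(grammema, 0) + 1
--
--     # Ищем неявные повторы: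
--     if "lemmas" in t1:
--         # Если есть леммы - значит, использован алгоритм Портера
--         result["semantic_repeats"] = len(t1["lemmas"] & t2["lemmas"]) - len(common)
--     else:
--         tokens_left = t1["tokens"] - common
--         tokens_right = t2["tokens"] - common
--         left_matches, right_matches = set(), set()
--         for w1, l1 in tokens_left:
--             for w2, l2 in tokens_right:
--                 if levenstein_distance(w1, w2) < max((len(w1), len(w2)))//2:
--                     left_matches.add(w1)
--                     right_matches.add(w2)
--         result["semantic_repeats"] = min((len(left_matches), len(right_matches)))
--
--     return result
-- ===== SOURCE B (Python) =====
-- def levenstein_distance(a, b):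
--     '''Levenshtein distance via top-down memoized recursion on prefix lengths.'''
--     memo = {}
--     def lev(i, j):
--         if i == 0:
--             return j
--         if j == 0:
--             return i
--         key = (i, j)
--         if key in memo:
--             return memo[key]
--         cost = 0 if a[i-1] == b[j-1] else 1
--         r = min(lev(i-1, j) + 1, lev(i, j-1) + 1, lev(i-1, j-1) + cost)
--         memo[key] = r
--         return r
--     return lev(len(a), len(b))
--
-- def texts_comparison(t1, t2):
--     tok1, tok2 = t1["tokens"], t2["tokens"]
--     common = tok1 & tok2
--     result = {}
--     for g in [g for _, g in common]:
--         result[g] = result.get(g, 0) + 1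
--     if "lemmas" in t1:
--         result["semantic_repeats"] = len(t1["lemmas"] & t2["lemmas"]) - len(common)
--     else:
--         left = [w for w, _ in tok1 - common]
--         right = [w for w, _ in tok2 - common]
--         def fuzzy(x, y):
--             return levenstein_distance(x, y) < max(len(x), len(y)) // 2
--         lm = {x for x in left if any(fuzzy(x, y) for y in right)}
--         rm = {y for y in right if any(fuzzy(x, y) for x in left)}
--         result["semantic_repeats"] = min(len(lm), len(rm))
--     return result
-- ===== Notes on version B (the rewrite author's own statement) =====
-- stated objective: alternative
-- what changed: The Levenshtein core is re-expressed as top-down memoized recursion on the standard edit-distance recurrence (dropping A's length-swap, since the distance is symmetric), and the fuzzy-match sets are built by two independent filter passes instead of one nested loop mutating two sets.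
import Mathlib
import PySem

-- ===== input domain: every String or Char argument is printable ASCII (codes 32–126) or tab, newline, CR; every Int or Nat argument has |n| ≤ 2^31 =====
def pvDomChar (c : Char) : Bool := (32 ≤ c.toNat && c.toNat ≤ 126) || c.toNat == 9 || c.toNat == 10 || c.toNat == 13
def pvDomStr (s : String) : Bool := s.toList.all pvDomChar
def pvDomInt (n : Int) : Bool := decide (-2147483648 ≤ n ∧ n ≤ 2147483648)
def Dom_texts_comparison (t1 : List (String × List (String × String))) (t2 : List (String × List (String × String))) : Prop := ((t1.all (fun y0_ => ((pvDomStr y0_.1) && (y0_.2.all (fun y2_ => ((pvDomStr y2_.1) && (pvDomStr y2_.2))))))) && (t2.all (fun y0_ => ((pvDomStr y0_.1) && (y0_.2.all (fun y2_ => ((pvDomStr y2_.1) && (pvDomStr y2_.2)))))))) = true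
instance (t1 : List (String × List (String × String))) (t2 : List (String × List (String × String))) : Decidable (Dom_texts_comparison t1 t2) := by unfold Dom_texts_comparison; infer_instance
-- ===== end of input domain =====

-- B recasts the Levenshtein core as top-down memoized recursion (no length swap; the distance is
-- symmetric) and builds the fuzzy-match sets by two independent filter passes instead of A's nested
-- loop mutating two sets; same return value.

-- ===== PORT A =====
-- A's levenstein_distance: swap so the first string is the shorter, then rolling-row DP.
def pvLevACore (al bl : List Char) : Int :=
  let n := al.length
  let m := bl.length
  let row0 : List Int := List.map (fun (k : Nat) => (k : Int)) (List.range (n+1))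
  let last := (List.range' 1 m).foldl (fun prev i =>
      (List.range' 1 n).foldl (fun cur j =>
          let add := prev.getD j 0 + 1
          let del := cur.getD (j-1) 0 + 1
          let change := prev.getD (j-1) 0 +
            (if al.getD (j-1) ' ' ≠ bl.getD (i-1) ' ' then (1 : Int) else 0)
          cur.set j (min add (min del change)))
        ((i : Int) :: List.replicate n 0)) row0
  last.getD n 0

def pvLevA (a b : String) : Int :=
  if a.toList.length > b.toList.length then pvLevACore b.toList a.toList
  else pvLevACore a.toList b.toList

def texts_comparison (t1 : List (String × List (String × String))) (t2 : List (String × List (String × String))) : List (String × Int) :=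
  let d1 := PySem.Dict.mk t1
  let d2 := PySem.Dict.mk t2
  let tok1 : PySem.Set (String × String) := PySem.Set.ofList (d1.getD "tokens" [])
  let tok2 : PySem.Set (String × String) := PySem.Set.ofList (d2.getD "tokens" [])
  let common := PySem.Set.inter tok1 tok2
  let result := common.foldl (fun r p => r.insert p.2 (r.getD p.2 0 + 1))
      (PySem.Dict.empty : PySem.Dict String Int)
  let result :=
    if d1.contains "lemmas" then
      result.insert "semantic_repeats"
        ((PySem.Set.inter (PySem.Set.ofList (d1.getD "lemmas" []))
            (PySem.Set.ofList (d2.getD "lemmas" []))).length - (common.length : Int))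
    else
      let tokens_left := PySem.Set.diff tok1 common
      let tokens_right := PySem.Set.diff tok2 common
      let lr := tokens_left.foldl (fun (acc : PySem.Set String × PySem.Set String) p1 =>
          tokens_right.foldl (fun acc p2 =>
            if pvLevA p1.1 p2.1 <
                PySem.Int.floordiv (max (PySem.Str.len p1.1) (PySem.Str.len p2.1)) 2 then
              (PySem.Set.add acc.1 p1.1, PySem.Set.add acc.2 p2.1)
            else acc) acc)
        ((PySem.Set.empty : PySem.Set String), (PySem.Set.empty : PySem.Set String))
      result.insert "semantic_repeats" (min (lr.1.length : Int) (lr.2.length : Int))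
  result.items

-- ===== PORT B =====
-- B's memoized recursive lev(i, j); the memo dict is threaded through the calls.
def pvLevBGo (al bl : List Char) : Nat → Nat → PySem.Dict (Nat × Nat) Int → Int × PySem.Dict (Nat × Nat) Int
  | 0, j, memo => ((j : Int), memo)
  | i+1, 0, memo => (((i+1 : Nat) : Int), memo)
  | i+1, j+1, memo =>
    match memo.get? (i+1, j+1) with
    | some v => (v, memo)
    | none =>
      let cost : Int := if al.getD i ' ' == bl.getD j ' ' then 0 else 1
      let r1 := pvLevBGo al bl i (j+1) memo
      let r2 := pvLevBGo al bl (i+1) j r1.2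
      let r3 := pvLevBGo al bl i j r2.2
      let r := min (r1.1 + 1) (min (r2.1 + 1) (r3.1 + cost))
      (r, r3.2.insert (i+1, j+1) r)
termination_by i j _ => i + j

def pvLevB (a b : String) : Int :=
  (pvLevBGo a.toList b.toList a.toList.length b.toList.length PySem.Dict.empty).1

def texts_comparison_alt (t1 : List (String × List (String × String))) (t2 : List (String × List (String × String))) : List (String × Int) :=
  let d1 := PySem.Dict.mk t1
  let d2 := PySem.Dict.mk t2
  let tok1 : PySem.Set (String × String) := PySem.Set.ofList (d1.getD "tokens" [])
  let tok2 : PySem.Set (String × String) := PySem.Set.ofList (d2.getD "tokens" [])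
  let common := PySem.Set.inter tok1 tok2
  let result := (common.map (fun p => p.2)).foldl (fun r g => r.modify g 0 (· + 1))
      (PySem.Dict.empty : PySem.Dict String Int)
  let result :=
    if d1.contains "lemmas" then
      result.insert "semantic_repeats"
        ((PySem.Set.inter (PySem.Set.ofList (d1.getD "lemmas" []))
            (PySem.Set.ofList (d2.getD "lemmas" []))).length - (common.length : Int))
    else
      let left := (PySem.Set.diff tok1 common).map (fun p => p.1)
      let right := (PySem.Set.diff tok2 common).map (fun p => p.1)
      let lm : PySem.Set String := PySem.Set.ofList (left.filter (fun x =>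
        right.any (fun y => pvLevB x y < PySem.Int.floordiv (max (PySem.Str.len x) (PySem.Str.len y)) 2)))
      let rm : PySem.Set String := PySem.Set.ofList (right.filter (fun y =>
        left.any (fun x => pvLevB x y < PySem.Int.floordiv (max (PySem.Str.len x) (PySem.Str.len y)) 2)))
      result.insert "semantic_repeats" (min (lm.length : Int) (rm.length : Int))
  result.items

-- ===== PRECONDITION & SPEC =====
-- Pre_ excludes exactly the inputs where Python A raises KeyError: a missing "tokens" key in either
-- dict, or "lemmas" present in t1 but missing in t2.
def Pre_texts_comparison (t1 : List (String × List (String × String))) (t2 : List (String × List (String × String))) : Prop :=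
  (PySem.Dict.mk t1).contains "tokens" = true ∧ (PySem.Dict.mk t2).contains "tokens" = true ∧
  ((PySem.Dict.mk t1).contains "lemmas" = true → (PySem.Dict.mk t2).contains "lemmas" = true)
instance (t1 : List (String × List (String × String))) (t2 : List (String × List (String × String))) : Decidable (Pre_texts_comparison t1 t2) := by unfold Pre_texts_comparison; infer_instance

def pvWitness_texts_comparison : (List (String × List (String × String))) × (List (String × List (String × String))) :=
  ([("tokens", [("cat", "N"), ("dog", "N")])], [("tokens", [("cat", "N"), ("dig", "N")])])

def Spec_texts_comparison (t1 : List (String × List (String × String))) (t2 : List (String × List (String × String))) (out : List (String × Int)) : Prop := out = texts_comparison_alt t1 t2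
instance (t1 : List (String × List (String × String))) (t2 : List (String × List (String × String))) (out : List (String × Int)) : Decidable (Spec_texts_comparison t1 t2 out) := by unfold Spec_texts_comparison; infer_instance

-- ===== CLAIM (what is proved, stated in full; the proofs are below) =====
def Claim_equal_texts_comparison : Prop := ∀ (t1 : List (String × List (String × String))) (t2 : List (String × List (String × String))), Dom_texts_comparison t1 t2 → Pre_texts_comparison t1 t2 → Spec_texts_comparison t1 t2 (texts_comparison t1 t2)

-- ===== LEMMAS AND PROOFS =====

-- Pure reference recurrence: levSpec al bl i j = edit distance of the first i chars of al and the
-- first j chars of bl (as both ports index their strings).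
def levSpec (al bl : List Char) : Nat → Nat → Int
  | 0, j => (j : Int)
  | i+1, 0 => (((i+1 : Nat)) : Int)
  | i+1, j+1 =>
    min (levSpec al bl i (j+1) + 1)
      (min (levSpec al bl (i+1) j + 1)
        (levSpec al bl i j + (if al.getD i ' ' == bl.getD j ' ' then (0 : Int) else 1)))
termination_by i j => i + j

theorem levSpec_zero_right (al bl : List Char) (i : Nat) : levSpec al bl i 0 = (i : Int) := by
  cases i <;> simp [levSpec]

theorem levSpec_symm (al bl : List Char) (i j : Nat) : levSpec al bl i j = levSpec bl al j i := by
  fun_induction levSpec al bl i j with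
  | case1 j => cases j <;> simp [levSpec]
  | case2 i => simp [levSpec]
  | case3 i j ih1 ih2 ih3 =>
    rw [levSpec.eq_3 bl al j i, ih1, ih2, ih3]
    have hc : (bl.getD j ' ' == al.getD i ' ') = (al.getD i ' ' == bl.getD j ' ') := by
      simp [BEq.comm]
    rw [hc]
    omega

theorem mapRange_getD (f : Nat → Int) (N q : Nat) (h : q < N) :
    ((List.range N).map f).getD q 0 = f q := by
  rw [List.getD_eq_getElem?_getD]
  simp [h]

theorem innerRow (al bl : List Char) (prev : List Int) (i : Nat) (hi : 1 ≤ i)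
    (hprev : prev = (List.range (al.length+1)).map (fun q => levSpec al bl q (i-1)))
    (k : Nat) (hk : k ≤ al.length) :
    (List.range' 1 k).foldl
      (fun cur j =>
        cur.set j (min (prev.getD j 0 + 1)
          (min (cur.getD (j-1) 0 + 1)
            (prev.getD (j-1) 0 + if al.getD (j-1) ' ' ≠ bl.getD (i-1) ' ' then (1:Int) else 0))))
      ((i : Int) :: List.replicate al.length 0)
    = (List.range (k+1)).map (fun q => levSpec al bl q i) ++ List.replicate (al.length - k) 0 := by
  induction k with
  | zero =>
    obtain ⟨i', rfl⟩ : ∃ i', i = i' + 1 := ⟨i - 1, by omega⟩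
    simp [List.range_succ, levSpec]
  | succ k ih =>
    have hk' : k ≤ al.length := by omega
    rw [List.range'_concat, List.foldl_append, ih hk']
    obtain ⟨i', rfl⟩ : ∃ i', i = i' + 1 := ⟨i - 1, by omega⟩
    simp only [List.foldl_cons, List.foldl_nil, Nat.one_mul]
    have hlen : ((List.range (k+1)).map (fun q => levSpec al bl q (i'+1))).length = k + 1 := by simp
    have hcur_k : (((List.range (k+1)).map (fun q => levSpec al bl q (i'+1)) ++ List.replicate (al.length - k) 0)).getD ((1+k)-1) 0 = levSpec al bl k (i'+1) := by
      rw [List.getD_eq_getElem?_getD, List.getElem?_append_left (by omega)]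
      have := mapRange_getD (fun q => levSpec al bl q (i'+1)) (k+1) k (by omega)
      rw [List.getD_eq_getElem?_getD] at this
      simpa using this
    have hprev_k1 : prev.getD (1+k) 0 = levSpec al bl (k+1) i' := by
      rw [hprev, show 1+k = k+1 by omega]
      simpa using mapRange_getD (fun q => levSpec al bl q (i'+1-1)) (al.length+1) (k+1) (by omega)
    have hprev_k : prev.getD ((1+k)-1) 0 = levSpec al bl k i' := by
      rw [hprev, show (1+k)-1 = k by omega]
      simpa using mapRange_getD (fun q => levSpec al bl q (i'+1-1)) (al.length+1) k (by omega)
    rw [hcur_k, hprev_k1, hprev_k]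
    have hcost : (if al.getD ((1+k)-1) ' ' ≠ bl.getD ((i'+1)-1) ' ' then (1:Int) else 0)
        = (if (al.getD k ' ' == bl.getD i' ' ') = true then (0:Int) else 1) := by
      rw [show (1+k)-1 = k by omega, show (i'+1)-1 = i' by omega]
      by_cases h : al.getD k ' ' = bl.getD i' ' ' <;> simp [h]
    rw [hcost]
    have hv : min (levSpec al bl (k+1) i' + 1)
        (min (levSpec al bl k (i'+1) + 1)
          (levSpec al bl k i' + if (al.getD k ' ' == bl.getD i' ' ') = true then (0:Int) else 1))
        = levSpec al bl (k+1) (i'+1) := by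
      rw [levSpec.eq_3]
      omega
    rw [hv]
    have hset : ((List.range (k+1)).map (fun q => levSpec al bl q (i'+1)) ++ List.replicate (al.length - k) 0).set (1+k) (levSpec al bl (k+1) (i'+1))
        = (List.range (k+1+1)).map (fun q => levSpec al bl q (i'+1)) ++ List.replicate (al.length - (k+1)) 0 := by
      rw [List.set_append_right _ _ (by simp)]
      have hrep : List.replicate (al.length - k) (0:Int) = 0 :: List.replicate (al.length - (k+1)) 0 := by
        rw [show al.length - k = (al.length - (k+1)) + 1 by omega, List.replicate_succ]
      rw [hrep, hlen, show 1+k-(k+1) = 0 by omega]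
      simp [List.range_succ]
    exact hset

theorem outerRows (al bl : List Char) (m' : Nat) :
    (List.range' 1 m').foldl (fun (prev : List Int) (i : Nat) =>
      (List.range' 1 al.length).foldl (fun cur j =>
          cur.set j (min (prev.getD j 0 + 1)
            (min (cur.getD (j-1) 0 + 1)
              (prev.getD (j-1) 0 + if al.getD (j-1) ' ' ≠ bl.getD (i-1) ' ' then (1:Int) else 0))))
        ((i : Int) :: List.replicate al.length 0))
      (List.map (fun (k : Nat) => (k : Int)) (List.range (al.length+1)))
    = (List.range (al.length+1)).map (fun q => levSpec al bl q m') := by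
  induction m' with
  | zero =>
    simp only [List.range'_zero, List.foldl_nil]
    exact List.map_congr_left (fun q _ => (levSpec_zero_right al bl q).symm)
  | succ m' ih =>
    rw [List.range'_concat, List.foldl_append, ih]
    simp only [List.foldl_cons, List.foldl_nil, Nat.one_mul]
    have h := innerRow al bl ((List.range (al.length+1)).map (fun q => levSpec al bl q ((1+m')-1))) (1+m') (by omega)
      (by rfl) al.length (le_refl _)
    simp only [Nat.add_sub_cancel_left] at h ⊢
    rw [h]
    simp [show 1+m' = m'+1 by omega]

theorem pvLevACore_eq (al bl : List Char) : pvLevACore al bl = levSpec al bl al.length bl.length := by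
  simp only [pvLevACore]
  rw [outerRows]
  exact mapRange_getD _ (al.length+1) al.length (by omega)

def GoodMemo (al bl : List Char) (m : PySem.Dict (Nat × Nat) Int) : Prop :=
  ∀ p v, m.get? p = some v → v = levSpec al bl p.1 p.2

theorem pvLevBGo_correct (al bl : List Char) (i j : Nat) (m : PySem.Dict (Nat × Nat) Int)
    (hm : GoodMemo al bl m) :
    (pvLevBGo al bl i j m).1 = levSpec al bl i j ∧ GoodMemo al bl (pvLevBGo al bl i j m).2 := by
  fun_induction pvLevBGo al bl i j m with
  | case1 j m => exact ⟨by simp [levSpec], hm⟩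
  | case2 i m => exact ⟨by simp [levSpec], hm⟩
  | case3 i j m v hget => exact ⟨by simpa using hm (i+1, j+1) v hget, hm⟩
  | case4 i j m hget cost r1 r2 r3 r ihA ihB ihC ihD =>
    obtain ⟨e1, g1⟩ := ihA hm
    obtain ⟨e2, g2⟩ := ihB g1
    obtain ⟨e3, g3⟩ := ihD g2
    have E1 : r1.1 = levSpec al bl i (j+1) := e1
    have E2 : r2.1 = levSpec al bl (i+1) j := e2
    have E3 : r3.1 = levSpec al bl i j := e3
    have G3 : GoodMemo al bl r3.2 := g3
    have hr : r = levSpec al bl (i+1) (j+1) := by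
      show min (r1.1 + 1) (min (r2.1 + 1) (r3.1 + cost)) = _
      have hc : cost = if (al.getD i ' ' == bl.getD j ' ') = true then (0:Int) else 1 := rfl
      rw [E1, E2, E3, hc, levSpec.eq_3]
    refine ⟨hr, ?_⟩
    intro p w hw
    replace hw : (r3.2.insert (i+1, j+1) r).get? p = some w := hw
    rw [PySem.Dict.get?_insert] at hw
    split at hw
    · next hp =>
      cases hw
      subst hp
      simpa using hr
    · exact G3 p w hw

theorem pvLevB_eq (a b : String) :
    pvLevB a b = levSpec a.toList b.toList a.toList.length b.toList.length := by
  have h := pvLevBGo_correct a.toList b.toList a.toList.length b.toList.length PySem.Dict.empty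
    (by intro p v hv; simp [PySem.Dict.get?_empty] at hv)
  exact h.1

theorem pvLevA_eq (a b : String) :
    pvLevA a b = levSpec a.toList b.toList a.toList.length b.toList.length := by
  unfold pvLevA
  split
  · rw [pvLevACore_eq, levSpec_symm]
  · rw [pvLevACore_eq]

theorem pvLev_agree : pvLevA = pvLevB := by
  funext a b
  rw [pvLevA_eq, pvLevB_eq]


theorem count_fold_eq (l : List (String × String)) (d : PySem.Dict String Int) :
    l.foldl (fun r p => r.insert p.2 (r.getD p.2 0 + 1)) d
      = (l.map (fun p => p.2)).foldl (fun r g => r.modify g 0 (· + 1)) d := by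
  rw [List.foldl_map]
  rfl

theorem add_add_self {α : Type} [BEq α] [LawfulBEq α] (s : PySem.Set α) (x : α) :
    PySem.Set.add (PySem.Set.add s x) x = PySem.Set.add s x := by
  apply PySem.Set.add_of_mem
  rw [PySem.Set.mem_add]
  right; rfl

theorem foldl_pair_if {α β γ : Type} [BEq α] [LawfulBEq α] [BEq β] [LawfulBEq β]
    (l : List γ) (c : γ → Bool) (x : α) (pick : γ → β) (s : PySem.Set α × PySem.Set β) :
    l.foldl (fun acc p => if c p then (PySem.Set.add acc.1 x, PySem.Set.add acc.2 (pick p)) else acc) s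
      = (if l.any c then PySem.Set.add s.1 x else s.1,
         l.foldl (fun t p => if c p then PySem.Set.add t (pick p) else t) s.2) := by
  induction l generalizing s with
  | nil => simp
  | cons p rest ih =>
    simp only [List.foldl_cons, List.any_cons]
    by_cases hc : c p
    · simp only [hc, if_true, Bool.true_or, ih]
      rw [add_add_self]
      simp
    · simp only [hc, Bool.false_or, ih]
      simp

theorem mem_foldl_addIf {β γ : Type} [BEq β] [LawfulBEq β]
    (l : List γ) (c : γ → Bool) (pick : γ → β) (s : PySem.Set β) (y : β) :
    y ∈ l.foldl (fun t p => if c p then PySem.Set.add t (pick p) else t) s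
      ↔ y ∈ s ∨ ∃ p ∈ l, c p ∧ y = pick p := by
  induction l generalizing s with
  | nil => simp
  | cons p rest ih =>
    simp only [List.foldl_cons]
    by_cases hc : c p
    · simp only [hc, if_true, ih, PySem.Set.mem_add]
      constructor
      · rintro (( h | h) | h)
        · exact Or.inl h
        · exact Or.inr ⟨p, by simp [hc, h]⟩
        · obtain ⟨q, hq, hcq, hy⟩ := h
          exact Or.inr ⟨q, by simp [hq, hcq, hy]⟩
      · rintro (h | ⟨q, hq, hcq, hy⟩)
        · exact Or.inl (Or.inl h)
        · rcases List.mem_cons.mp hq with rfl | hq'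
          · exact Or.inl (Or.inr hy)
          · exact Or.inr ⟨q, hq', hcq, hy⟩
    · simp only [hc, ih]
      constructor
      · rintro (h | ⟨q, hq, hcq, hy⟩)
        · exact Or.inl h
        · exact Or.inr ⟨q, List.mem_cons_of_mem _ hq, hcq, hy⟩
      · rintro (h | ⟨q, hq, hcq, hy⟩)
        · exact Or.inl h
        · rcases List.mem_cons.mp hq with rfl | hq'
          · simp [hcq] at hc
          · exact Or.inr ⟨q, hq', hcq, hy⟩

theorem nodup_foldl_addIf {β γ : Type} [BEq β] [LawfulBEq β]
    (l : List γ) (c : γ → Bool) (pick : γ → β) (s : PySem.Set β) (hs : s.Nodup) :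
    (l.foldl (fun t p => if c p then PySem.Set.add t (pick p) else t) s).Nodup := by
  induction l generalizing s with
  | nil => exact hs
  | cons p rest ih =>
    simp only [List.foldl_cons]
    by_cases hc : c p
    · simp only [hc, if_true]
      exact ih _ (PySem.Set.nodup_add (s := s) (x := pick p) hs)
    · simp only [hc]
      exact ih _ hs

theorem left_fold_eq {γ : Type} (tl : List γ) (f : γ → String) (q : String → Bool)
    (s : PySem.Set String) :
    tl.foldl (fun t p => if q (f p) then PySem.Set.add t (f p) else t) s
      = PySem.Set.update s ((tl.map f).filter q) := by
  induction tl generalizing s with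
  | nil => rfl
  | cons p rest ih =>
    simp only [List.foldl_cons, List.map_cons, List.filter_cons]
    by_cases hq : q (f p)
    · simp only [hq, if_true]
      rw [ih, PySem.Set.update_cons]
    · simp only [hq]
      rw [ih]
      simp

theorem nested_right_mem {γ : Type} (tl tr : List γ) (c : γ → γ → Bool) (pick : γ → String)
    (s : PySem.Set String) (y : String) :
    y ∈ tl.foldl (fun t p1 => tr.foldl (fun t p2 => if c p1 p2 then PySem.Set.add t (pick p2) else t) t) s
      ↔ y ∈ s ∨ ∃ p1 ∈ tl, ∃ p2 ∈ tr, c p1 p2 ∧ y = pick p2 := by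
  induction tl generalizing s with
  | nil => simp
  | cons p1 rest ih =>
    simp only [List.foldl_cons]
    rw [ih, mem_foldl_addIf]
    constructor
    · rintro ((h | ⟨p2, hp2, hc, hy⟩) | ⟨q1, hq1, q2, hq2, hc, hy⟩)
      · exact Or.inl h
      · exact Or.inr ⟨p1, List.mem_cons_self, p2, hp2, hc, hy⟩
      · exact Or.inr ⟨q1, List.mem_cons_of_mem _ hq1, q2, hq2, hc, hy⟩
    · rintro (h | ⟨q1, hq1, q2, hq2, hc, hy⟩)
      · exact Or.inl (Or.inl h)
      · rcases List.mem_cons.mp hq1 with rfl | hq1'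
        · exact Or.inl (Or.inr ⟨q2, hq2, hc, hy⟩)
        · exact Or.inr ⟨q1, hq1', q2, hq2, hc, hy⟩

theorem nested_right_nodup {γ : Type} (tl tr : List γ) (c : γ → γ → Bool) (pick : γ → String)
    (s : PySem.Set String) (hs : s.Nodup) :
    (tl.foldl (fun t p1 => tr.foldl (fun t p2 => if c p1 p2 then PySem.Set.add t (pick p2) else t) t) s).Nodup := by
  induction tl generalizing s with
  | nil => exact hs
  | cons p1 rest ih =>
    simp only [List.foldl_cons]
    exact ih _ (nodup_foldl_addIf _ _ _ _ hs)


theorem anymap (l : List (String × String)) (p : String → Bool) :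
    (l.map (fun x => x.1)).any p = l.any (fun x => p x.1) := by
  rw [List.any_map]; rfl

theorem pair_fold_split (q : String → String → Bool) (tl tr : List (String × String))
    (s : PySem.Set String × PySem.Set String) :
    tl.foldl (fun (acc : PySem.Set String × PySem.Set String) p1 =>
        tr.foldl (fun acc p2 => if q p1.1 p2.1 then (acc.1.add p1.1, acc.2.add p2.1) else acc) acc) s
    = (tl.foldl (fun t p1 => if tr.any (fun p2 => q p1.1 p2.1) then t.add p1.1 else t) s.1,
       tl.foldl (fun t p1 => tr.foldl (fun t p2 => if q p1.1 p2.1 then t.add p2.1 else t) t) s.2) := by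
  induction tl generalizing s with
  | nil => simp
  | cons p1 rest ih =>
    simp only [List.foldl_cons]
    rw [foldl_pair_if tr (fun p2 => q p1.1 p2.1) p1.1 (fun p2 => p2.1) s, ih]

theorem fuzzy_min_eq (q : String → String → Bool) (tl tr : List (String × String)) :
    min ((tl.foldl (fun (acc : PySem.Set String × PySem.Set String) p1 =>
          tr.foldl (fun acc p2 => if q p1.1 p2.1 then (acc.1.add p1.1, acc.2.add p2.1) else acc) acc)
          ((PySem.Set.empty : PySem.Set String), (PySem.Set.empty : PySem.Set String))).1.length : Int)
        ((tl.foldl (fun (acc : PySem.Set String × PySem.Set String) p1 =>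
          tr.foldl (fun acc p2 => if q p1.1 p2.1 then (acc.1.add p1.1, acc.2.add p2.1) else acc) acc)
          ((PySem.Set.empty : PySem.Set String), (PySem.Set.empty : PySem.Set String))).2.length : Int)
    = min ((PySem.Set.ofList ((tl.map (fun p => p.1)).filter
            (fun x => (tr.map (fun p => p.1)).any (fun y => q x y)))).length : Int)
          ((PySem.Set.ofList ((tr.map (fun p => p.1)).filter
            (fun y => (tl.map (fun p => p.1)).any (fun x => q x y)))).length : Int) := by
  rw [pair_fold_split]
  have hleft : tl.foldl (fun t p1 => if tr.any (fun p2 => q p1.1 p2.1) then t.add p1.1 else t)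
        (PySem.Set.empty : PySem.Set String)
      = PySem.Set.ofList ((tl.map (fun p => p.1)).filter
          (fun x => (tr.map (fun p => p.1)).any (fun y => q x y))) := by
    have h := left_fold_eq tl (fun p => p.1) (fun x => tr.any (fun p2 => q x p2.1)) PySem.Set.empty
    simp only [anymap]
    exact h
  have hperm : (tl.foldl (fun t p1 => tr.foldl (fun t p2 => if q p1.1 p2.1 then t.add p2.1 else t) t)
        (PySem.Set.empty : PySem.Set String)).Perm
      (PySem.Set.ofList ((tr.map (fun p => p.1)).filter
          (fun y => (tl.map (fun p => p.1)).any (fun x => q x y)))) := by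
    have ndA := nested_right_nodup tl tr (fun p1 p2 => q p1.1 p2.1) (fun p => p.1)
      PySem.Set.empty List.nodup_nil
    have ndB := PySem.Set.nodup_ofList ((tr.map (fun p => p.1)).filter
          (fun y => (tl.map (fun p => p.1)).any (fun x => q x y)))
    rw [List.perm_ext_iff_of_nodup ndA ndB]
    intro y
    rw [nested_right_mem, PySem.Set.mem_ofList, List.mem_filter, anymap]
    simp only [PySem.Set.empty, List.not_mem_nil, false_or, List.mem_map]
    constructor
    · rintro ⟨p1, hp1, p2, hp2, hq, rfl⟩
      exact ⟨⟨p2, hp2, rfl⟩, List.any_eq_true.mpr ⟨p1, hp1, hq⟩⟩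
    · rintro ⟨⟨p2, hp2, rfl⟩, hany⟩
      obtain ⟨p1, hp1, hq⟩ := List.any_eq_true.mp hany
      exact ⟨p1, hp1, p2, hp2, hq, rfl⟩
  rw [hleft, hperm.length_eq]

theorem fuzzy_min_eq' (q : String → String → Prop) [inst : ∀ x y, Decidable (q x y)] (tl tr : List (String × String)) :
    min ((tl.foldl (fun (acc : PySem.Set String × PySem.Set String) p1 =>
          tr.foldl (fun acc p2 => if q p1.1 p2.1 then (acc.1.add p1.1, acc.2.add p2.1) else acc) acc)
          ((PySem.Set.empty : PySem.Set String), (PySem.Set.empty : PySem.Set String))).1.length : Int)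
        ((tl.foldl (fun (acc : PySem.Set String × PySem.Set String) p1 =>
          tr.foldl (fun acc p2 => if q p1.1 p2.1 then (acc.1.add p1.1, acc.2.add p2.1) else acc) acc)
          ((PySem.Set.empty : PySem.Set String), (PySem.Set.empty : PySem.Set String))).2.length : Int)
    = min ((PySem.Set.ofList ((tl.map (fun p => p.1)).filter
            (fun x => (tr.map (fun p => p.1)).any (fun y => decide (q x y))))).length : Int)
          ((PySem.Set.ofList ((tr.map (fun p => p.1)).filter
            (fun y => (tl.map (fun p => p.1)).any (fun x => decide (q x y))))).length : Int) := by
  have h := fuzzy_min_eq (fun x y => decide (q x y)) tl tr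
  simp only [decide_eq_true_eq] at h
  exact h

-- ===== VERDICT (by name: the statement is the Claim_ definition above) =====
theorem texts_comparison_spec : Claim_equal_texts_comparison := by
  intro t1 t2 _ _
  show texts_comparison t1 t2 = texts_comparison_alt t1 t2
  simp only [texts_comparison, texts_comparison_alt, pvLev_agree]
  rw [count_fold_eq]
  split
  · rfl
  · rw [fuzzy_min_eq' (fun x y => pvLevB x y < PySem.Int.floordiv (max (PySem.Str.len x) (PySem.Str.len y)) 2)]
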